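-- pv_equiv track=rewrite | github.com/bundlwise/bun-nlp | bun-nlp/src/convert_to_bert.py | find_token_positions
-- ===== SOURCE A (Python) =====
-- def find_token_positions(offset_mapping, char_start, char_end):
--     """
--     Improved function to find token positions for character spans
--     Handles edge cases better and finds the best token span
--     """
--     token_start = None
--     token_end = None
--
--     # Find the first token that overlaps with the character start
--     for i, (start, end) in enumerate(offset_mapping):
--         if start <= char_start < end or (start == char_start and end > char_start):
--             token_start = i
--             break
--
--     # Find the last token that overlaps with the character end
--     for i, (start, end) in enumerate(offset_mapping):
--         if start < char_end <= end or (start == char_end and end > char_end):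
--             token_end = i + 1  # +1 to make it exclusive
--             break
--         elif start >= char_end:
--             # We've gone past the end, stop here
--             token_end = i
--             break
--
--     # If we couldn't find exact matches, try to find the closest tokens
--     if token_start is None:
--         for i, (start, end) in enumerate(offset_mapping):
--             if end > char_start:
--                 token_start = i
--                 break
--         # If still not found, use the first token
--         if token_start is None:
--             token_start = 0
--
--     if token_end is None:
--         for i in range(len(offset_mapping) - 1, -1, -1):
--             start, end = offset_mapping[i]
--             if start < char_end:
--                 token_end = i + 1
--                 break
--         # If still not found, use the last token
--         if token_end is None:
--             token_end = len(offset_mapping)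
--
--     return token_start, token_end
-- ===== SOURCE B (Python) =====
-- def find_token_positions(offset_mapping, char_start, char_end):
--     # One forward sweep maintaining all candidates instead of four separate scans.
--     ts_primary = None   # first token whose interval contains char_start
--     ts_fallback = None  # first token with end > char_start
--     te = None           # decided token_end (first trigger of A's end conditions)
--     last_lt = None      # last token with start < char_end (backward-scan fallback)
--     for i, (start, end) in enumerate(offset_mapping):
--         if ts_primary is None and start <= char_start < end:
--             ts_primary = i
--         if ts_fallback is None and end > char_start:
--             ts_fallback = i
--         if te is None:
--             if start < char_end <= end or (start == char_end and end > char_end):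
--                 te = i + 1
--             elif start >= char_end:
--                 te = i
--         if start < char_end:
--             last_lt = i
--     token_start = ts_primary if ts_primary is not None else (ts_fallback if ts_fallback is not None else 0)
--     if te is None:
--         te = last_lt + 1 if last_lt is not None else len(offset_mapping)
--     return token_start, te
-- ===== Notes on version B (the rewrite author's own statement) =====
-- stated objective: alternative
-- what changed: Replaced A's four separate first-match scans (two forward, a fallback forward scan and an index-based reverse scan) with one forward pass over enumerate(offset_mapping) that maintains all four candidates (primary start, fallback start, decided end, last token with start < char_end) and resolves defaults after the loop.
import Mathlib
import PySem

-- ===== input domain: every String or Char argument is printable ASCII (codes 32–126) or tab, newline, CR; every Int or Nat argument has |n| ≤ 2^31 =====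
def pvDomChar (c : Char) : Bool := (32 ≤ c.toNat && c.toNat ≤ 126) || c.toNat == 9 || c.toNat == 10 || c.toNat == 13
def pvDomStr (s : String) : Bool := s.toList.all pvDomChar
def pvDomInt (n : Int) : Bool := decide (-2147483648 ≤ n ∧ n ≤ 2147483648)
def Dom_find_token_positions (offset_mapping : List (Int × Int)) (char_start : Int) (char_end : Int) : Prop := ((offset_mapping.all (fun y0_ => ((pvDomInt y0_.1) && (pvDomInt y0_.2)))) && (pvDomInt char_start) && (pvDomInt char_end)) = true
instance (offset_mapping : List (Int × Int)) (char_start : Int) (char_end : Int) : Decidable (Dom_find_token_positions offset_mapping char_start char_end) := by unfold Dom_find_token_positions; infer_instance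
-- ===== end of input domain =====

-- B replaces A's four separate first-match scans (one of them a reverse scan) by a single
-- forward fold that maintains all four candidates at once; objective: alternative decomposition.

-- ===== PORT A =====
-- first loop of A: first token with start <= char_start < end (or the redundant disjunct)
def ftpScanStart (cs : Int) : List (Int × (Int × Int)) → Option Int
  | [] => none
  | (i, (s, e)) :: rest =>
      if (s ≤ cs ∧ cs < e) ∨ (s = cs ∧ e > cs) then some i else ftpScanStart cs rest

-- second loop of A: overlap at char_end gives i+1, 'gone past' gives i
def ftpScanEnd (ce : Int) : List (Int × (Int × Int)) → Option Int
  | [] => none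
  | (i, (s, e)) :: rest =>
      if (s < ce ∧ ce ≤ e) ∨ (s = ce ∧ e > ce) then some (i + 1)
      else if s ≥ ce then some i
      else ftpScanEnd ce rest

-- third loop of A: first token with end > char_start
def ftpScanFb (cs : Int) : List (Int × (Int × Int)) → Option Int
  | [] => none
  | (i, (_, e)) :: rest => if e > cs then some i else ftpScanFb cs rest

-- fourth loop of A: backward over indices (applied to the reversed enumeration), first start < char_end
def ftpScanBack (ce : Int) : List (Int × (Int × Int)) → Option Int
  | [] => none
  | (i, (s, _)) :: rest => if s < ce then some (i + 1) else ftpScanBack ce rest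

def find_token_positions (offset_mapping : List (Int × Int)) (char_start : Int) (char_end : Int) : Int × Int :=
  let enum := PySem.List.enumerate offset_mapping
  let token_start : Int :=
    match ftpScanStart char_start enum with
    | some v => v
    | none =>
      match ftpScanFb char_start enum with
      | some v => v
      | none => 0
  let token_end : Int :=
    match ftpScanEnd char_end enum with
    | some v => v
    | none =>
      match ftpScanBack char_end enum.reverse with
      | some v => v
      | none => (offset_mapping.length : Int)
  (token_start, token_end)

-- ===== PORT B =====
-- one step of B's single forward sweep: state = (ts_primary, ts_fallback, te, last_lt)
def ftpStep (cs ce : Int) (st : Option Int × Option Int × Option Int × Option Int)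
    (p : Int × (Int × Int)) : Option Int × Option Int × Option Int × Option Int :=
  let i := p.1; let s := p.2.1; let e := p.2.2
  ( (if st.1 = none ∧ s ≤ cs ∧ cs < e then some i else st.1),
    (if st.2.1 = none ∧ e > cs then some i else st.2.1),
    (if st.2.2.1 = none then
        (if (s < ce ∧ ce ≤ e) ∨ (s = ce ∧ e > ce) then some (i + 1)
         else if s ≥ ce then some i else none)
      else st.2.2.1),
    (if s < ce then some i else st.2.2.2) )

def find_token_positions_alt (offset_mapping : List (Int × Int)) (char_start : Int) (char_end : Int) : Int × Int :=
  let st := (PySem.List.enumerate offset_mapping).foldl (ftpStep char_start char_end) (none, none, none, none)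
  let token_start : Int := st.1.getD (st.2.1.getD 0)
  let token_end : Int :=
    match st.2.2.1 with
    | some v => v
    | none =>
      match st.2.2.2 with
      | some j => j + 1
      | none => (offset_mapping.length : Int)
  (token_start, token_end)

-- ===== PRECONDITION & SPEC =====
def Spec_find_token_positions (offset_mapping : List (Int × Int)) (char_start : Int) (char_end : Int) (out : Int × Int) : Prop := out = find_token_positions_alt offset_mapping char_start char_end
instance (offset_mapping : List (Int × Int)) (char_start : Int) (char_end : Int) (out : Int × Int) : Decidable (Spec_find_token_positions offset_mapping char_start char_end out) := by unfold Spec_find_token_positions; infer_instance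

-- ===== CLAIM (what is proved, stated in full; the proofs are below) =====
def Claim_equal_find_token_positions : Prop := ∀ (offset_mapping : List (Int × Int)) (char_start : Int) (char_end : Int), Dom_find_token_positions offset_mapping char_start char_end → Spec_find_token_positions offset_mapping char_start char_end (find_token_positions offset_mapping char_start char_end)

-- ===== LEMMAS AND PROOFS =====

-- strict first-some choice, used to characterise the fold
def ftpOr (a b : Option Int) : Option Int :=
  match a with
  | some v => some v
  | none => b

-- forward "last match with start < ce" of an enumerated list
def ftpLast (ce : Int) : List (Int × (Int × Int)) → Option Int
  | [] => none
  | (i, (s, _)) :: rest => ftpOr (ftpLast ce rest) (if s < ce then some i else none)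

theorem ftpOr_none_left (b : Option Int) : ftpOr none b = b := rfl

theorem ftpOr_none_right (a : Option Int) : ftpOr a none = a := by
  cases a <;> rfl

theorem ftpOr_some_left (v : Int) (b : Option Int) : ftpOr (some v) b = some v := rfl

theorem ftpOr_assoc (a b c : Option Int) : ftpOr (ftpOr a b) c = ftpOr a (ftpOr b c) := by
  cases a <;> rfl

theorem ftpScanBack_append (ce : Int) (xs ys : List (Int × (Int × Int))) :
    ftpScanBack ce (xs ++ ys) = ftpOr (ftpScanBack ce xs) (ftpScanBack ce ys) := by
  induction xs with
  | nil => rfl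
  | cons p rest ih =>
    obtain ⟨i, s, e⟩ := p
    simp only [List.cons_append, ftpScanBack]
    by_cases h : s < ce
    · simp [h, ftpOr]
    · simp [h, ih]

theorem ftpScanBack_reverse (ce : Int) (xs : List (Int × (Int × Int))) :
    ftpScanBack ce xs.reverse = (ftpLast ce xs).map (fun j => j + 1) := by
  induction xs with
  | nil => rfl
  | cons p rest ih =>
    obtain ⟨i, s, e⟩ := p
    simp only [List.reverse_cons, ftpScanBack_append, ih, ftpLast]
    cases hl : ftpLast ce rest with
    | none => by_cases h : s < ce <;> simp [ftpOr, ftpScanBack, h]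
    | some j => simp [ftpOr]

-- characterisation of B's single fold: each component is the corresponding scan of A
theorem ftpFold_char (cs ce : Int) (l : List (Int × Int)) (s0 : Int)
    (tsP tsF te last : Option Int) :
    (PySem.List.enumerate l s0).foldl (ftpStep cs ce) (tsP, tsF, te, last) =
      ( ftpOr tsP (ftpScanStart cs (PySem.List.enumerate l s0)),
        ftpOr tsF (ftpScanFb cs (PySem.List.enumerate l s0)),
        ftpOr te (ftpScanEnd ce (PySem.List.enumerate l s0)),
        ftpOr (ftpLast ce (PySem.List.enumerate l s0)) last ) := by
  induction l generalizing s0 tsP tsF te last with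
  | nil =>
    cases tsP <;> cases tsF <;> cases te <;> cases last <;>
      simp [PySem.List.enumerate_nil, ftpScanStart, ftpScanFb, ftpScanEnd, ftpLast, ftpOr]
  | cons p rest ih =>
    obtain ⟨s, e⟩ := p
    rw [PySem.List.enumerate_cons]
    simp only [List.foldl_cons, ftpStep, ih]
    refine Prod.ext ?_ (Prod.ext ?_ (Prod.ext ?_ ?_)) <;>
      simp only [ftpScanStart, ftpScanFb, ftpScanEnd, ftpLast]
    · -- ts_primary
      cases tsP with
      | some v => simp [ftpOr_some_left]
      | none =>
        by_cases h : (s ≤ cs ∧ cs < e) ∨ (s = cs ∧ e > cs)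
        · have h' : s ≤ cs ∧ cs < e := by
            rcases h with h | h
            · exact h
            · omega
          simp [h', ftpOr]
        · have h' : ¬ (s ≤ cs ∧ cs < e) := fun hc => h (Or.inl hc)
          simp [h', ftpOr_none_left]
          intro h1 h2
          exact absurd ⟨by omega, h2⟩ h'
    · -- ts_fallback
      cases tsF with
      | some v => simp [ftpOr_some_left]
      | none =>
        by_cases h : e > cs
        · simp [h, ftpOr]
        · simp [h, ftpOr_none_left]
    · -- token_end
      cases te with
      | some v => simp [ftpOr_some_left]
      | none =>
        by_cases h1 : (s < ce ∧ ce ≤ e) ∨ (s = ce ∧ e > ce)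
        · simp [h1, ftpOr]
        · by_cases h2 : s ≥ ce
          · simp [h1, h2, ftpOr]
          · simp [h1, h2, ftpOr_none_left]
    · -- last_lt
      by_cases h : s < ce
      · rw [ftpOr_assoc]
        simp [h, ftpOr]
      · simp [h, ftpOr_none_right]

-- ===== VERDICT (by name: the statement is the Claim_ definition above) =====
theorem find_token_positions_spec : Claim_equal_find_token_positions := by
  intro om cs ce _
  unfold Spec_find_token_positions find_token_positions find_token_positions_alt
  rw [ftpFold_char]
  simp only [ftpOr_none_left, ftpOr_none_right, ftpScanBack_reverse]
  cases hs : ftpScanStart cs (PySem.List.enumerate om) <;>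
  cases hf : ftpScanFb cs (PySem.List.enumerate om) <;>
  cases he : ftpScanEnd ce (PySem.List.enumerate om) <;>
  cases hl : ftpLast ce (PySem.List.enumerate om) <;>
    simp [Option.getD]
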